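-- pv_equiv track=rewrite | github.com/aniketk33/LeetcodeSolutions | two-pointers/sort-array-by-parity-2.py | sort_array_2
-- ===== SOURCE A (Python) =====
-- def sort_array_2(nums):
--     even, odd = 0, 1
--
--     while even < len(nums) and odd < len(nums):
--         # moving the even pointer
--         while even < len(nums) and nums[even] % 2 == 0:
--             even += 2
--         # moving the odd pointer
--         while odd < len(nums) and nums[odd] % 2 != 0:
--             odd += 2
--
--         # swap places if the value at even or odd index is odd or even respective
--         if even < len(nums) and odd < len(nums):
--             nums[even], nums[odd] = nums[odd], nums[even]
--             even += 2
--             odd += 2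
--
--     return nums
-- ===== SOURCE B (Python) =====
-- def sort_array_2(nums):
--     # One pass to collect the misplaced positions, then pair them up and swap.
--     bad_even = [i for i, v in enumerate(nums) if i % 2 == 0 and v % 2 != 0]
--     bad_odd = [i for i, v in enumerate(nums) if i % 2 == 1 and v % 2 == 0]
--     for i, j in zip(bad_even, bad_odd):
--         nums[i], nums[j] = nums[j], nums[i]
--     return nums
-- ===== Notes on version B (the rewrite author's own statement) =====
-- stated objective: alternative
-- what changed: B replaces A's interleaved two-pointer while-loop (scan-and-swap with stateful even/odd pointers) by one collection pass building the lists of misplaced even and odd positions, then swapping the zipped pairs.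
import Mathlib
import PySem

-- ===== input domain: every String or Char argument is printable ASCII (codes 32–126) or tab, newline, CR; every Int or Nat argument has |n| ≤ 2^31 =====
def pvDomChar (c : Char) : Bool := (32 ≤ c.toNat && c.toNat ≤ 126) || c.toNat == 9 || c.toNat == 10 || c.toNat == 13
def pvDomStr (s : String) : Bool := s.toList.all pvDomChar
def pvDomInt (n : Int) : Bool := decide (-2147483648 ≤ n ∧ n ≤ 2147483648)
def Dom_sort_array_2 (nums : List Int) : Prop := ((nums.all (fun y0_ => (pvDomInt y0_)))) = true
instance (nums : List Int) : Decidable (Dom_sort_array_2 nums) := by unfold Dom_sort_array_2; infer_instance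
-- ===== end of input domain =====

-- B replaces A's interleaved two-pointer while-loops by one collection pass (the misplaced
-- even and odd positions) followed by paired swaps over their zip; same return value, and both
-- Pythons mutate `nums` in place the same way (the equivalence proved is about the return value).
-- The loops are ported with an explicit fuel argument that only makes them total: the fuel
-- passed is always sufficient (each iteration advances a pointer by 2), so it never cuts a run.

-- ===== PORT A =====
-- inner loop 'while even < len(nums) and nums[even] % 2 == 0: even += 2'
-- (pointer indices are nonnegative Nats and only read in range, so getD is exact for nums[i])
def evenPtr (l : List Int) (fuel : Nat) (e : Nat) : Nat :=
  match fuel with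
  | 0 => e
  | f + 1 =>
    if e < l.length ∧ PySem.Int.mod (l.getD e 0) 2 = 0 then evenPtr l f (e + 2) else e

-- inner loop 'while odd < len(nums) and nums[odd] % 2 != 0: odd += 2'
def oddPtr (l : List Int) (fuel : Nat) (o : Nat) : Nat :=
  match fuel with
  | 0 => o
  | f + 1 =>
    if o < l.length ∧ PySem.Int.mod (l.getD o 0) 2 ≠ 0 then oddPtr l f (o + 2) else o

-- outer 'while even < len(nums) and odd < len(nums)' loop of A
def aLoop (l : List Int) (fuel : Nat) (e o : Nat) : List Int :=
  match fuel with
  | 0 => l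
  | f + 1 =>
    if e < l.length ∧ o < l.length then
      let e' := evenPtr l (l.length + 1) e
      let o' := oddPtr l (l.length + 1) o
      if e' < l.length ∧ o' < l.length then
        -- nums[even], nums[odd] = nums[odd], nums[even]
        aLoop ((l.set e' (l.getD o' 0)).set o' (l.getD e' 0)) f (e' + 2) (o' + 2)
      else l
    else l

def sort_array_2 (nums : List Int) : List Int := aLoop nums (nums.length + 1) 0 1

-- ===== PORT B =====
def sort_array_2_alt (nums : List Int) : List Int :=
  let badEven := ((PySem.List.enumerate nums 0).filter
      (fun p => PySem.Int.mod p.1 2 == 0 && PySem.Int.mod p.2 2 != 0)).map (fun p => p.1)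
  let badOdd := ((PySem.List.enumerate nums 0).filter
      (fun p => PySem.Int.mod p.1 2 == 1 && PySem.Int.mod p.2 2 == 0)).map (fun p => p.1)
  (badEven.zip badOdd).foldl
    (fun l p =>
      -- nums[i], nums[j] = nums[j], nums[i]
      PySem.List.pySetD (PySem.List.pySetD l p.1 (PySem.List.pyGetD l p.2 0)) p.2
        (PySem.List.pyGetD l p.1 0))
    nums

-- ===== PRECONDITION & SPEC =====
def Spec_sort_array_2 (nums : List Int) (out : List Int) : Prop := out = sort_array_2_alt nums
instance (nums : List Int) (out : List Int) : Decidable (Spec_sort_array_2 nums out) := by unfold Spec_sort_array_2; infer_instance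

-- ===== CLAIM (what is proved, stated in full; the proofs are below) =====
def Claim_equal_sort_array_2 : Prop := ∀ (nums : List Int), Dom_sort_array_2 nums → Spec_sort_array_2 nums (sort_array_2 nums)

-- ===== LEMMAS AND PROOFS =====

-- the even indices ≥ e holding an odd value (as Ints), in increasing order
def badE (l : List Int) (e : Nat) : List Int :=
  if e < l.length then
    if PySem.Int.mod (l.getD e 0) 2 = 0 then badE l (e + 2)
    else (e : Int) :: badE l (e + 2)
  else []
termination_by l.length - e
decreasing_by all_goals omega

-- the odd indices ≥ o holding an even value
def badO (l : List Int) (o : Nat) : List Int :=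
  if o < l.length then
    if PySem.Int.mod (l.getD o 0) 2 = 0 then (o : Int) :: badO l (o + 2)
    else badO l (o + 2)
  else []
termination_by l.length - o
decreasing_by all_goals omega

-- B's swap step
def swapStep (l : List Int) (p : Int × Int) : List Int :=
  PySem.List.pySetD (PySem.List.pySetD l p.1 (PySem.List.pyGetD l p.2 0)) p.2
    (PySem.List.pyGetD l p.1 0)

theorem modCast (k : Nat) : PySem.Int.mod (k : Int) 2 = ((k % 2 : Nat) : Int) := by
  exact_mod_cast PySem.Int.mod_natCast k 2

theorem badE_nil (l : List Int) (e : Nat) (h : l.length ≤ e) : badE l e = [] := by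
  rw [badE, if_neg (by omega)]

theorem badO_nil (l : List Int) (o : Nat) (h : l.length ≤ o) : badO l o = [] := by
  rw [badO, if_neg (by omega)]

theorem evenPtr_ge (l : List Int) : ∀ fuel e, e ≤ evenPtr l fuel e := by
  intro fuel
  induction fuel with
  | zero => intro e; rw [evenPtr]
  | succ f ih =>
    intro e
    rw [evenPtr]
    by_cases h : e < l.length ∧ PySem.Int.mod (l.getD e 0) 2 = 0
    · rw [if_pos h]; have := ih (e + 2); omega
    · rw [if_neg h]

theorem oddPtr_ge (l : List Int) : ∀ fuel o, o ≤ oddPtr l fuel o := by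
  intro fuel
  induction fuel with
  | zero => intro o; rw [oddPtr]
  | succ f ih =>
    intro o
    rw [oddPtr]
    by_cases h : o < l.length ∧ PySem.Int.mod (l.getD o 0) 2 ≠ 0
    · rw [if_pos h]; have := ih (o + 2); omega
    · rw [if_neg h]

theorem evenPtr_mod (l : List Int) : ∀ fuel e, evenPtr l fuel e % 2 = e % 2 := by
  intro fuel
  induction fuel with
  | zero => intro e; rw [evenPtr]
  | succ f ih =>
    intro e
    rw [evenPtr]
    by_cases h : e < l.length ∧ PySem.Int.mod (l.getD e 0) 2 = 0
    · rw [if_pos h]; have := ih (e + 2); omega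
    · rw [if_neg h]

theorem oddPtr_mod (l : List Int) : ∀ fuel o, oddPtr l fuel o % 2 = o % 2 := by
  intro fuel
  induction fuel with
  | zero => intro o; rw [oddPtr]
  | succ f ih =>
    intro o
    rw [oddPtr]
    by_cases h : o < l.length ∧ PySem.Int.mod (l.getD o 0) 2 ≠ 0
    · rw [if_pos h]; have := ih (o + 2); omega
    · rw [if_neg h]

-- with sufficient fuel the inner loop stops only out of range or on an odd value
theorem evenPtr_stop (l : List Int) : ∀ fuel e, l.length ≤ e + 2 * fuel →
    evenPtr l fuel e < l.length → PySem.Int.mod (l.getD (evenPtr l fuel e) 0) 2 ≠ 0 := by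
  intro fuel
  induction fuel with
  | zero =>
    intro e hf hlt
    rw [evenPtr] at hlt
    omega
  | succ f ih =>
    intro e hf hlt
    rw [evenPtr] at hlt ⊢
    by_cases h : e < l.length ∧ PySem.Int.mod (l.getD e 0) 2 = 0
    · rw [if_pos h] at hlt ⊢
      exact ih (e + 2) (by omega) hlt
    · rw [if_neg h] at hlt ⊢
      intro hmod
      exact h ⟨hlt, hmod⟩

theorem oddPtr_stop (l : List Int) : ∀ fuel o, l.length ≤ o + 2 * fuel →
    oddPtr l fuel o < l.length → PySem.Int.mod (l.getD (oddPtr l fuel o) 0) 2 = 0 := by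
  intro fuel
  induction fuel with
  | zero =>
    intro o hf hlt
    rw [oddPtr] at hlt
    omega
  | succ f ih =>
    intro o hf hlt
    rw [oddPtr] at hlt ⊢
    by_cases h : o < l.length ∧ PySem.Int.mod (l.getD o 0) 2 ≠ 0
    · rw [if_pos h] at hlt ⊢
      exact ih (o + 2) (by omega) hlt
    · rw [if_neg h] at hlt ⊢
      by_contra hmod
      exact h ⟨hlt, hmod⟩

-- skipping even values does not change the misplaced-even-index list
theorem badE_skip (l : List Int) : ∀ fuel e, badE l (evenPtr l fuel e) = badE l e := by
  intro fuel
  induction fuel with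
  | zero => intro e; rw [evenPtr]
  | succ f ih =>
    intro e
    rw [evenPtr]
    by_cases h : e < l.length ∧ PySem.Int.mod (l.getD e 0) 2 = 0
    · rw [if_pos h, ih (e + 2)]
      conv_rhs => rw [badE]
      rw [if_pos h.1, if_pos h.2]
    · rw [if_neg h]

theorem badO_skip (l : List Int) : ∀ fuel o, badO l (oddPtr l fuel o) = badO l o := by
  intro fuel
  induction fuel with
  | zero => intro o; rw [oddPtr]
  | succ f ih =>
    intro o
    rw [oddPtr]
    by_cases h : o < l.length ∧ PySem.Int.mod (l.getD o 0) 2 ≠ 0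
    · rw [if_pos h, ih (o + 2)]
      conv_rhs => rw [badO]
      rw [if_pos h.1, if_neg h.2]
    · rw [if_neg h]

theorem getD_set_ne (l : List Int) (i k : Nat) (v d : Int) (h : i ≠ k) :
    (l.set i v).getD k d = l.getD k d := by
  simp [List.getD, List.getElem?_set_ne h]

-- badE only reads positions of the parity of e, at or beyond e
theorem badE_congr (l l' : List Int) (hlen : l'.length = l.length) :
    ∀ n e, l.length - e ≤ n →
      (∀ k, e ≤ k → k % 2 = e % 2 → l'.getD k 0 = l.getD k 0) → badE l' e = badE l e := by
  intro n
  induction n with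
  | zero =>
    intro e hle _
    rw [badE_nil l e (by omega), badE_nil l' e (by omega)]
  | succ n ih =>
    intro e hle hk
    by_cases he : e < l.length
    · have hval := hk e le_rfl rfl
      have ihe := ih (e + 2) (by omega)
        (fun k h1 h2 => hk k (by omega) (by omega))
      conv_lhs => rw [badE]
      conv_rhs => rw [badE]
      rw [if_pos (show e < l'.length by omega), if_pos he, hval]
      by_cases hm : PySem.Int.mod (l.getD e 0) 2 = 0
      · rw [if_pos hm, if_pos hm, ihe]
      · rw [if_neg hm, if_neg hm, ihe]
    · rw [badE_nil l e (by omega), badE_nil l' e (by omega)]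

theorem badO_congr (l l' : List Int) (hlen : l'.length = l.length) :
    ∀ n o, l.length - o ≤ n →
      (∀ k, o ≤ k → k % 2 = o % 2 → l'.getD k 0 = l.getD k 0) → badO l' o = badO l o := by
  intro n
  induction n with
  | zero =>
    intro o hle _
    rw [badO_nil l o (by omega), badO_nil l' o (by omega)]
  | succ n ih =>
    intro o hle hk
    by_cases ho : o < l.length
    · have hval := hk o le_rfl rfl
      have iho := ih (o + 2) (by omega)
        (fun k h1 h2 => hk k (by omega) (by omega))
      conv_lhs => rw [badO]
      conv_rhs => rw [badO]
      rw [if_pos (show o < l'.length by omega), if_pos ho, hval]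
      by_cases hm : PySem.Int.mod (l.getD o 0) 2 = 0
      · rw [if_pos hm, if_pos hm, iho]
      · rw [if_neg hm, if_neg hm, iho]
    · rw [badO_nil l o (by omega), badO_nil l' o (by omega)]

-- main loop invariant: A's loop computes B's zip-of-swaps fold
theorem aLoop_eq_fold :
    ∀ fuel (l : List Int) (e o : Nat), l.length - e + (l.length - o) ≤ 2 * fuel →
      e % 2 = 0 → o % 2 = 1 →
      aLoop l fuel e o = ((badE l e).zip (badO l o)).foldl swapStep l := by
  intro fuel
  induction fuel with
  | zero =>
    intro l e o hle hpe hpo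
    rw [aLoop, badE_nil l e (by omega)]
    rfl
  | succ f ih =>
    intro l e o hle hpe hpo
    by_cases h1 : e < l.length ∧ o < l.length
    · set e' := evenPtr l (l.length + 1) e with he'
      set o' := oddPtr l (l.length + 1) o with ho'
      have hge : e ≤ e' := evenPtr_ge l (l.length + 1) e
      have hgo : o ≤ o' := oddPtr_ge l (l.length + 1) o
      have hpe' : e' % 2 = 0 := by rw [he', evenPtr_mod]; omega
      have hpo' : o' % 2 = 1 := by rw [ho', oddPtr_mod]; omega
      rw [← badE_skip l (l.length + 1) e, ← badO_skip l (l.length + 1) o, ← he', ← ho']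
      by_cases h2 : e' < l.length ∧ o' < l.length
      · have hre : badE l e' = (e' : Int) :: badE l (e' + 2) := by
          conv_lhs => rw [badE]
          rw [if_pos h2.1,
            if_neg (show ¬_ by
              rw [he']; exact evenPtr_stop l (l.length + 1) e (by omega) (he' ▸ h2.1))]
        have hro : badO l o' = (o' : Int) :: badO l (o' + 2) := by
          conv_lhs => rw [badO]
          rw [if_pos h2.2,
            if_pos (show _ by
              rw [ho']; exact oddPtr_stop l (l.length + 1) o (by omega) (ho' ▸ h2.2))]
        set l₂ := (l.set e' (l.getD o' 0)).set o' (l.getD e' 0) with hl₂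
        have hlen₂ : l₂.length = l.length := by rw [hl₂]; simp
        have hstep : swapStep l ((e' : Int), (o' : Int)) = l₂ := by
          simp [swapStep, hl₂]
        have hne : e' ≠ o' := by omega
        have hE2 : badE l₂ (e' + 2) = badE l (e' + 2) := by
          refine badE_congr l l₂ hlen₂ l.length (e' + 2) (by omega) ?_
          intro k hk hpar
          rw [hl₂, getD_set_ne _ _ _ _ _ (by omega), getD_set_ne _ _ _ _ _ (by omega)]
        have hO2 : badO l₂ (o' + 2) = badO l (o' + 2) := by
          refine badO_congr l l₂ hlen₂ l.length (o' + 2) (by omega) ?_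
          intro k hk hpar
          rw [hl₂, getD_set_ne _ _ _ _ _ (by omega), getD_set_ne _ _ _ _ _ (by omega)]
        have hrec : aLoop l (f + 1) e o = aLoop l₂ f (e' + 2) (o' + 2) := by
          conv_lhs => rw [aLoop]
          rw [if_pos h1]
          simp only [← he', ← ho']
          rw [if_pos h2, ← hl₂]
        rw [hrec, ih l₂ (e' + 2) (o' + 2) (by rw [hlen₂]; omega) (by omega) (by omega)]
        rw [hre, hro, hE2, hO2, List.zip_cons_cons, List.foldl_cons, hstep]
      · have hzip : (badE l e').zip (badO l o') = [] := by
          rcases not_and_or.mp h2 with h | h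
          · rw [badE_nil l e' (by omega)]; rfl
          · rw [badO_nil l o' (by omega), List.zip_nil_right]
        conv_lhs => rw [aLoop]
        rw [if_pos h1]
        simp only [← he', ← ho']
        rw [if_neg h2, hzip]
        rfl
    · rw [aLoop, if_neg h1]
      rcases not_and_or.mp h1 with h | h
      · rw [badE_nil l e (by omega)]; rfl
      · rw [badO_nil l o (by omega), List.zip_nil_right]; rfl

-- B's comprehension over enumerate computes badE
theorem badE_range (l : List Int) :
    ∀ n (e : Nat), l.length - e ≤ n → e % 2 = 0 →
      (PySem.List.pyRange (e : Int) (l.length : Int) 1).filter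
        (fun j => PySem.Int.mod j 2 == 0 &&
          PySem.Int.mod (PySem.List.pyGetD l j 0) 2 != 0) = badE l e := by
  intro n
  induction n with
  | zero =>
    intro e hle hpe
    rw [badE_nil l e (by omega),
      PySem.List.pyRange_one_eq_nil (by exact_mod_cast (show l.length ≤ e by omega))]
    rfl
  | succ n ih =>
    intro e hle hpe
    by_cases he : e < l.length
    · have hmode : PySem.Int.mod (e : Int) 2 = 0 := by
        rw [modCast, hpe]; norm_num
      have htail :
          (PySem.List.pyRange ((e : Int) + 1) (l.length : Int) 1).filter
            (fun j => PySem.Int.mod j 2 == 0 &&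
              PySem.Int.mod (PySem.List.pyGetD l j 0) 2 != 0) = badE l (e + 2) := by
        rw [show ((e : Int) + 1) = ((e + 1 : Nat) : Int) by push_cast; ring]
        by_cases he1 : e + 1 < l.length
        · rw [PySem.List.pyRange_one_cons (by exact_mod_cast he1)]
          simp only [List.filter_cons]
          have hm1 : (PySem.Int.mod ((e + 1 : Nat) : Int) 2 == 0) = false := by
            rw [modCast, show (e + 1) % 2 = 1 from by omega]
            decide
          rw [hm1, Bool.false_and, if_neg Bool.false_ne_true,
            show (((e + 1 : Nat) : Int) + 1) = ((e + 2 : Nat) : Int) by push_cast; ring]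
          exact ih (e + 2) (by omega) (by omega)
        · rw [PySem.List.pyRange_one_eq_nil (by exact_mod_cast (show l.length ≤ e + 1 by omega)),
            badE_nil l (e + 2) (by omega)]
          rfl
      rw [PySem.List.pyRange_one_cons (by exact_mod_cast he)]
      simp only [List.filter_cons]
      rw [PySem.List.pyGetD_natCast]
      conv_rhs => rw [badE]
      rw [if_pos he]
      by_cases hv : PySem.Int.mod (l.getD e 0) 2 = 0
      · rw [if_pos hv]
        have hb : (PySem.Int.mod (e : Int) 2 == 0 &&
            PySem.Int.mod (l.getD e 0) 2 != 0) = false := by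
          rw [hmode, hv]; decide
        rw [hb, if_neg Bool.false_ne_true]
        exact htail
      · rw [if_neg hv]
        have hb : (PySem.Int.mod (e : Int) 2 == 0 &&
            PySem.Int.mod (l.getD e 0) 2 != 0) = true := by
          rw [hmode, Bool.and_eq_true]
          exact ⟨by decide, bne_iff_ne.mpr hv⟩
        rw [hb, if_pos rfl, htail]
    · rw [badE_nil l e (by omega),
        PySem.List.pyRange_one_eq_nil (by exact_mod_cast (show l.length ≤ e by omega))]
      rfl

theorem badO_range (l : List Int) :
    ∀ n (o : Nat), l.length - o ≤ n → o % 2 = 1 →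
      (PySem.List.pyRange (o : Int) (l.length : Int) 1).filter
        (fun j => PySem.Int.mod j 2 == 1 &&
          PySem.Int.mod (PySem.List.pyGetD l j 0) 2 == 0) = badO l o := by
  intro n
  induction n with
  | zero =>
    intro o hle hpo
    rw [badO_nil l o (by omega),
      PySem.List.pyRange_one_eq_nil (by exact_mod_cast (show l.length ≤ o by omega))]
    rfl
  | succ n ih =>
    intro o hle hpo
    by_cases ho : o < l.length
    · have hmodo : PySem.Int.mod (o : Int) 2 = 1 := by
        rw [modCast, hpo]; norm_num
      have htail :
          (PySem.List.pyRange ((o : Int) + 1) (l.length : Int) 1).filter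
            (fun j => PySem.Int.mod j 2 == 1 &&
              PySem.Int.mod (PySem.List.pyGetD l j 0) 2 == 0) = badO l (o + 2) := by
        rw [show ((o : Int) + 1) = ((o + 1 : Nat) : Int) by push_cast; ring]
        by_cases ho1 : o + 1 < l.length
        · rw [PySem.List.pyRange_one_cons (by exact_mod_cast ho1)]
          simp only [List.filter_cons]
          have hm1 : (PySem.Int.mod ((o + 1 : Nat) : Int) 2 == 1) = false := by
            rw [modCast, show (o + 1) % 2 = 0 from by omega]
            decide
          rw [hm1, Bool.false_and, if_neg Bool.false_ne_true,
            show (((o + 1 : Nat) : Int) + 1) = ((o + 2 : Nat) : Int) by push_cast; ring]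
          exact ih (o + 2) (by omega) (by omega)
        · rw [PySem.List.pyRange_one_eq_nil (by exact_mod_cast (show l.length ≤ o + 1 by omega)),
            badO_nil l (o + 2) (by omega)]
          rfl
      rw [PySem.List.pyRange_one_cons (by exact_mod_cast ho)]
      simp only [List.filter_cons]
      rw [PySem.List.pyGetD_natCast]
      conv_rhs => rw [badO]
      rw [if_pos ho]
      by_cases hv : PySem.Int.mod (l.getD o 0) 2 = 0
      · rw [if_pos hv]
        have hb : (PySem.Int.mod (o : Int) 2 == 1 &&
            PySem.Int.mod (l.getD o 0) 2 == 0) = true := by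
          rw [hmodo, hv]; decide
        rw [hb, if_pos rfl, htail]
      · rw [if_neg hv]
        have hb : (PySem.Int.mod (o : Int) 2 == 1 &&
            PySem.Int.mod (l.getD o 0) 2 == 0) = false := by
          rw [hmodo]
          cases hbe : (PySem.Int.mod (l.getD o 0) 2 == 0)
          · decide
          · exact absurd (eq_of_beq hbe) hv
        rw [hb, if_neg Bool.false_ne_true, htail]
    · rw [badO_nil l o (by omega),
        PySem.List.pyRange_one_eq_nil (by exact_mod_cast (show l.length ≤ o by omega))]
      rfl

theorem alt_eq_fold (nums : List Int) :
    sort_array_2_alt nums = ((badE nums 0).zip (badO nums 1)).foldl swapStep nums := by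
  unfold sort_array_2_alt
  rw [PySem.List.enumerate_eq_map_pyRange nums 0]
  rw [List.filter_map, List.filter_map, List.map_map, List.map_map]
  simp only [Function.comp_def, PySem.List.len_eq]
  rw [List.map_id'', List.map_id'']
  have hE := badE_range nums nums.length 0 (by omega) rfl
  have hO := badO_range nums nums.length 1 (by omega) rfl
  simp only [Nat.cast_zero] at hE
  simp only [Nat.cast_one] at hO
  have h01 : (PySem.List.pyRange 0 (nums.length : Int) 1).filter
      (fun j => PySem.Int.mod j 2 == 1 &&
        PySem.Int.mod (PySem.List.pyGetD nums j 0) 2 == 0) =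
      (PySem.List.pyRange 1 (nums.length : Int) 1).filter
      (fun j => PySem.Int.mod j 2 == 1 &&
        PySem.Int.mod (PySem.List.pyGetD nums j 0) 2 == 0) := by
    by_cases hn : (0 : Int) < (nums.length : Int)
    · rw [PySem.List.pyRange_one_cons hn]
      simp only [List.filter_cons]
      have hc : (PySem.Int.mod (0 : Int) 2 == 1) = false := by decide
      rw [hc, Bool.false_and, if_neg Bool.false_ne_true,
        show ((0 : Int) + 1) = 1 from by norm_num]
    · rw [PySem.List.pyRange_one_eq_nil (by omega), PySem.List.pyRange_one_eq_nil (by omega)]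
  rw [h01, hE, hO]
  · rfl
  · exact fun x => rfl
  · exact fun x => rfl

-- ===== VERDICT (by name: the statement is the Claim_ definition above) =====
theorem sort_array_2_spec : Claim_equal_sort_array_2 := by
  intro nums _
  unfold Spec_sort_array_2 sort_array_2
  rw [alt_eq_fold, aLoop_eq_fold (nums.length + 1) nums 0 1 (by omega) rfl rfl]
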